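-- pv_equiv track=rewrite | github.com/drapala/validahub-alpha | src/application/use_cases/rules/get_suggestions.py | _filter_existing_rules
-- ===== SOURCE A (Python) =====
-- from typing import Optional, List, Dict, Any
--
-- def _filter_existing_rules(
--
--     suggestions: List[Dict[str, Any]],
--     current_rules: List[str]
-- ) -> List[Dict[str, Any]]:
--     """Filter out suggestions that match existing rules."""
--     if not current_rules:
--         return suggestions
--
--     filtered = []
--     current_rules_set = set(current_rules)
--
--     for suggestion in suggestions:
--         suggestion_id = suggestion.get("rule_id", "")
--
--         # Skip if exact rule ID already exists
--         if suggestion_id in current_rules_set: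
--             continue
--
--         # Skip if same rule type for same field already exists
--         rule_type = suggestion.get("rule_type", "")
--         field = suggestion.get("field", "")
--
--         # Create a composite key for rule type + field
--         rule_key = f"{rule_type}:{field}"
--
--         # Check if similar rule already exists (simplified check)
--         similar_exists = any(
--             rule_id.startswith(rule_key) or rule_id.endswith(f"_{rule_type}")
--             for rule_id in current_rules
--         )
--
--         if not similar_exists:
--             filtered.append(suggestion)
--
--     return filtered
-- ===== SOURCE B (Python) =====
-- from typing import List, Dict, Any
--
--
-- def _filter_existing_rules(
--     suggestions: List[Dict[str, Any]],
--     current_rules: List[str]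
-- ) -> List[Dict[str, Any]]:
--     """Filter out suggestions that match existing rules."""
--     if not current_rules:
--         return suggestions
--
--     rules_set = set(current_rules)
--
--     # Distinct (rule_type, field) pairs, in first-occurrence order.
--     keys = list(dict.fromkeys(
--         (s.get("rule_type", ""), s.get("field", "")) for s in suggestions
--     ))
--
--     # One sweep over the rules marks every blocked (rule_type, field) pair,
--     # so no per-suggestion scan of current_rules remains.
--     blocked = set()
--     for rule_id in current_rules:
--         for rt, fld in keys:
--             if rule_id.startswith(f"{rt}:{fld}") or rule_id.endswith(f"_{rt}"):
--                 blocked.add((rt, fld))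
--
--     return [
--         s for s in suggestions
--         if s.get("rule_id", "") not in rules_set
--         and (s.get("rule_type", ""), s.get("field", "")) not in blocked
--     ]
-- ===== Notes on version B (the rewrite author's own statement) =====
-- stated objective: faster
-- what changed: A scans all of current_rules once per suggestion; B inverts the loops: it dedups the (rule_type, field) pairs of the suggestions, makes one sweep over current_rules to mark the blocked pairs, and then filters the suggestions by two set lookups, O(R*K + S) with K = number of distinct pairs instead of O(S*R).
import Mathlib
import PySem

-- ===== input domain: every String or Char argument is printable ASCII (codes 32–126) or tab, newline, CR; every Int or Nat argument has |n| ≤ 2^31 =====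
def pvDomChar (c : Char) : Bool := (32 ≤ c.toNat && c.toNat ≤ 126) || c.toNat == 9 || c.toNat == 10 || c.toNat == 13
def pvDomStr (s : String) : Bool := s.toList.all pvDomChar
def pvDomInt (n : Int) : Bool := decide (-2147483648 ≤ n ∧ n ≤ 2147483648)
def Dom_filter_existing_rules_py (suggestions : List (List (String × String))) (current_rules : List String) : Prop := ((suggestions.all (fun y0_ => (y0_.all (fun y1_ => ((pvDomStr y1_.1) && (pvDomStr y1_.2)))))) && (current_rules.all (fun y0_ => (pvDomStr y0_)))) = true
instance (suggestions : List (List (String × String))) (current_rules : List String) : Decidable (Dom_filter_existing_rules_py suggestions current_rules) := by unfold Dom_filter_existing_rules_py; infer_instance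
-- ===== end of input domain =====

-- B inverts A's loop nesting: one sweep over current_rules precomputes the set of
-- blocked (rule_type, field) pairs, then the suggestions are filtered by set lookups
-- (alternative decomposition; faster when suggestions share (rule_type, field) pairs).

-- ===== PORT A =====
def filter_existing_rules_py (suggestions : List (List (String × String))) (current_rules : List String) : List (List (String × String)) :=
  if current_rules = [] then suggestions
  else
    let current_rules_set : PySem.Set String := PySem.Set.ofList current_rules
    suggestions.foldl (fun filtered suggestion =>
      let suggestion_id := PySem.Dict.getD (PySem.Dict.mk suggestion) "rule_id" ""
      if PySem.Set.contains current_rules_set suggestion_id then filtered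
      else
        let rule_type := PySem.Dict.getD (PySem.Dict.mk suggestion) "rule_type" ""
        let field := PySem.Dict.getD (PySem.Dict.mk suggestion) "field" ""
        let rule_key := rule_type ++ ":" ++ field
        let similar_exists := current_rules.any (fun rule_id =>
          PySem.Str.startswith rule_id rule_key || PySem.Str.endswith rule_id ("_" ++ rule_type))
        if !similar_exists then filtered ++ [suggestion] else filtered) []

-- ===== PORT B =====
-- the prefix/suffix test B applies to one rule id and one (rule_type, field) pair
def pvMatch (rule_id : String) (k : String × String) : Bool :=
  PySem.Str.startswith rule_id (k.1 ++ ":" ++ k.2) || PySem.Str.endswith rule_id ("_" ++ k.1)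

def filter_existing_rules_py_alt (suggestions : List (List (String × String))) (current_rules : List String) : List (List (String × String)) :=
  if current_rules = [] then suggestions
  else
    let rules_set : PySem.Set String := PySem.Set.ofList current_rules
    let keys := PySem.List.dedup (suggestions.map (fun s =>
      (PySem.Dict.getD (PySem.Dict.mk s) "rule_type" "", PySem.Dict.getD (PySem.Dict.mk s) "field" "")))
    let blocked : PySem.Set (String × String) := current_rules.foldl (fun b rule_id =>
      keys.foldl (fun b k => if pvMatch rule_id k then PySem.Set.add b k else b) b) PySem.Set.empty
    suggestions.filter (fun s =>
      !(PySem.Set.contains rules_set (PySem.Dict.getD (PySem.Dict.mk s) "rule_id" "")) &&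
      !(PySem.Set.contains blocked
          (PySem.Dict.getD (PySem.Dict.mk s) "rule_type" "", PySem.Dict.getD (PySem.Dict.mk s) "field" "")))

-- ===== PRECONDITION & SPEC =====
def Spec_filter_existing_rules_py (suggestions : List (List (String × String))) (current_rules : List String) (out : List (List (String × String))) : Prop := out = filter_existing_rules_py_alt suggestions current_rules
instance (suggestions : List (List (String × String))) (current_rules : List String) (out : List (List (String × String))) : Decidable (Spec_filter_existing_rules_py suggestions current_rules out) := by unfold Spec_filter_existing_rules_py; infer_instance

-- ===== CLAIM (what is proved, stated in full; the proofs are below) =====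
def Claim_equal_filter_existing_rules_py : Prop := ∀ (suggestions : List (List (String × String))) (current_rules : List String), Dom_filter_existing_rules_py suggestions current_rules → Spec_filter_existing_rules_py suggestions current_rules (filter_existing_rules_py suggestions current_rules)

-- ===== LEMMAS AND PROOFS =====

-- membership in the inner fold of B's blocked-set construction
lemma mem_inner_fold (keys : List (String × String)) (rid : String)
    (b : PySem.Set (String × String)) (k : String × String) :
    k ∈ keys.foldl (fun b k => if pvMatch rid k then PySem.Set.add b k else b) b ↔
      k ∈ b ∨ (k ∈ keys ∧ pvMatch rid k = true) := by
  induction keys generalizing b with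
  | nil => simp
  | cons x xs ih =>
    simp only [List.foldl_cons]
    by_cases h : pvMatch rid x = true
    · rw [if_pos h, ih]
      simp only [PySem.Set.mem_add, List.mem_cons]
      constructor
      · rintro ((hb | rfl) | ⟨hm, hp⟩)
        · exact Or.inl hb
        · exact Or.inr ⟨Or.inl rfl, h⟩
        · exact Or.inr ⟨Or.inr hm, hp⟩
      · rintro (hb | ⟨rfl | hm, hp⟩)
        · exact Or.inl (Or.inl hb)
        · exact Or.inl (Or.inr rfl)
        · exact Or.inr ⟨hm, hp⟩
    · rw [if_neg h, ih]
      simp only [List.mem_cons]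
      constructor
      · rintro (hb | ⟨hm, hp⟩)
        · exact Or.inl hb
        · exact Or.inr ⟨Or.inr hm, hp⟩
      · rintro (hb | ⟨rfl | hm, hp⟩)
        · exact Or.inl hb
        · exact absurd hp h
        · exact Or.inr ⟨hm, hp⟩

-- membership in B's blocked set: some rule matches the pair, and the pair occurs among the keys
lemma mem_blocked (rules : List String) (keys : List (String × String))
    (b : PySem.Set (String × String)) (k : String × String) :
    k ∈ rules.foldl (fun b rid =>
        keys.foldl (fun b k => if pvMatch rid k then PySem.Set.add b k else b) b) b ↔
      k ∈ b ∨ (k ∈ keys ∧ ∃ rid ∈ rules, pvMatch rid k = true) := by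
  induction rules generalizing b with
  | nil => simp
  | cons r rs ih =>
    simp only [List.foldl_cons, ih, mem_inner_fold]
    constructor
    · rintro ((hb | ⟨hm, hp⟩) | ⟨hm, rid, hrid, hp⟩)
      · exact Or.inl hb
      · exact Or.inr ⟨hm, r, by simp, hp⟩
      · exact Or.inr ⟨hm, rid, by simp [hrid], hp⟩
    · rintro (hb | ⟨hm, rid, hrid, hp⟩)
      · exact Or.inl (Or.inl hb)
      · rcases List.mem_cons.mp hrid with rfl | hrs
        · exact Or.inl (Or.inr ⟨hm, hp⟩)
        · exact Or.inr ⟨hm, rid, hrs, hp⟩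

-- A's accumulator loop is a filter
lemma foldA_eq_filter {α : Type} (c1 c2 : α → Bool) (xs : List α) (acc : List α) :
    xs.foldl (fun filtered s => if c1 s then filtered
      else if c2 s then filtered ++ [s] else filtered) acc =
      acc ++ xs.filter (fun s => !c1 s && c2 s) := by
  induction xs generalizing acc with
  | nil => simp
  | cons x xs ih =>
    by_cases h1 : c1 x = true <;> by_cases h2 : c2 x = true <;> simp [h1, h2, ih]

-- ===== VERDICT (by name: the statement is the Claim_ definition above) =====
theorem filter_existing_rules_py_spec : Claim_equal_filter_existing_rules_py := by
  intro suggestions current_rules _hdom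
  unfold Spec_filter_existing_rules_py filter_existing_rules_py filter_existing_rules_py_alt
  by_cases hcr : current_rules = []
  · simp [hcr]
  · simp only [hcr, if_false]
    rw [foldA_eq_filter
      (fun s => PySem.Set.contains (PySem.Set.ofList current_rules)
        (PySem.Dict.getD (PySem.Dict.mk s) "rule_id" ""))
      (fun s => !(current_rules.any (fun rule_id =>
        PySem.Str.startswith rule_id
          ((PySem.Dict.getD (PySem.Dict.mk s) "rule_type" "") ++ ":" ++
            (PySem.Dict.getD (PySem.Dict.mk s) "field" "")) ||
        PySem.Str.endswith rule_id
          ("_" ++ (PySem.Dict.getD (PySem.Dict.mk s) "rule_type" "")))))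
      suggestions []]
    rw [List.nil_append]
    apply List.filter_congr
    intro s hs
    have hk : ((PySem.Dict.getD (PySem.Dict.mk s) "rule_type" ""),
        (PySem.Dict.getD (PySem.Dict.mk s) "field" "")) ∈
        PySem.List.dedup (suggestions.map (fun s =>
          (PySem.Dict.getD (PySem.Dict.mk s) "rule_type" "",
           PySem.Dict.getD (PySem.Dict.mk s) "field" ""))) := by
      rw [PySem.List.mem_dedup]
      exact List.mem_map.mpr ⟨s, hs, rfl⟩
    congr 1
    rw [Bool.not_eq_eq_eq_not, Bool.not_not, Bool.eq_iff_iff,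
      PySem.Set.contains_iff, mem_blocked, List.any_eq_true]
    constructor
    · rintro ⟨rid, hrid, hp⟩
      exact Or.inr ⟨hk, rid, hrid, by simpa [pvMatch] using hp⟩
    · rintro (hemp | ⟨_, rid, hrid, hp⟩)
      · simp [PySem.Set.empty] at hemp
      · exact ⟨rid, hrid, by simpa [pvMatch] using hp⟩
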